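-- pv_equiv track=rewrite | github.com/minwookkim115/Algorithm | 프로그래머스/1/133499. 옹알이 （2）/옹알이 （2）.py | solution
-- ===== SOURCE A (Python) =====
-- def solution(babbling):
--     answer = 0
--
--     for word in babbling:
--         i = 0
--         check = ''
--         while True:
--             if i >= len(word):
--                 answer += 1
--                 break
--
--             if word[i: i + 3] == 'aya' and check != 'aya':
--                 check = 'aya'
--                 i += 3
--             elif word[i: i + 2] == 'ye' and check != 'ye':
--                 check = 'ye'
--                 i += 2
--             elif word[i: i + 3] == 'woo' and check != 'woo':
--                 check = 'woo'
--                 i += 3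
--             elif word[i: i + 2] == 'ma' and check != 'ma':
--                 check = 'ma'
--                 i += 2
--             else:
--                 break
--
--
--     return answer
-- ===== SOURCE B (Python) =====
-- def _tokens(word):
--     # greedy tokenization: take a token where one starts, otherwise skip one char
--     if word == '':
--         return []
--     for t in ('aya', 'ye', 'woo', 'ma'):
--         if word.startswith(t):
--             return [t] + _tokens(word[len(t):])
--     return _tokens(word[1:])
--
--
-- def solution(babbling):
--     answer = 0
--     for word in babbling:
--         tokens = _tokens(word)
--         if ''.join(tokens) == word and all(a != b for a, b in zip(tokens, tokens[1:])):
--             answer += 1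
--     return answer
-- ===== Notes on version B (the rewrite author's own statement) =====
-- stated objective: alternative
-- what changed: A's stateful single-pass index/check loop per word is replaced by a tokenize-then-validate decomposition: greedily collect all token matches (skipping unmatched characters), then count the word iff the tokens joined reproduce the word and no two adjacent tokens are equal.
import Mathlib
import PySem

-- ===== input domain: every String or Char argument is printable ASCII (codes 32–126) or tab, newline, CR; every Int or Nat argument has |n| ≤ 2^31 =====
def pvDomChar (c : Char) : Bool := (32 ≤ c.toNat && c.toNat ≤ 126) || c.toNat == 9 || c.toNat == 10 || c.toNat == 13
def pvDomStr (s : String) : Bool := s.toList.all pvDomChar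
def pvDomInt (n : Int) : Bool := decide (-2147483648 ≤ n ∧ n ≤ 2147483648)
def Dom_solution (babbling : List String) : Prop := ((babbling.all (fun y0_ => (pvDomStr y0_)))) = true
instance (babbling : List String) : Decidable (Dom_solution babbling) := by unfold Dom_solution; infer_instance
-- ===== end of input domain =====

-- B replaces A's stateful single-pass index/check loop by a tokenize-then-validate
-- decomposition (collect greedy token matches, then check coverage and adjacency); alternative, not faster.
-- Strings are ported at the character-list level (exact: comparisons and slices of ASCII strings).

-- ===== PORT A =====
-- while loop ported as recursion on the same state (i, check); per-word contribution 1 (answer += 1) or 0 (break).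
def solGo (w : List Char) (i : Nat) (check : List Char) : Int :=
  if i ≥ w.length then 1
  else if PySem.List.slice w (some (i : Int)) (some ((i : Int) + 3)) = ['a','y','a'] ∧ check ≠ ['a','y','a'] then
    solGo w (i + 3) ['a','y','a']
  else if PySem.List.slice w (some (i : Int)) (some ((i : Int) + 2)) = ['y','e'] ∧ check ≠ ['y','e'] then
    solGo w (i + 2) ['y','e']
  else if PySem.List.slice w (some (i : Int)) (some ((i : Int) + 3)) = ['w','o','o'] ∧ check ≠ ['w','o','o'] then
    solGo w (i + 3) ['w','o','o']
  else if PySem.List.slice w (some (i : Int)) (some ((i : Int) + 2)) = ['m','a'] ∧ check ≠ ['m','a'] then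
    solGo w (i + 2) ['m','a']
  else 0
termination_by w.length - i
decreasing_by all_goals omega

def solution (babbling : List String) : Int :=
  babbling.foldl (fun answer word => answer + solGo word.toList 0 []) 0

-- ===== PORT B =====
-- _tokens: word.startswith(t) = the word's first |t| chars equal t; word[k:] = drop k.
def bTokens (cs : List Char) : List (List Char) :=
  if h0 : cs = [] then []
  else if cs.take 3 = ['a','y','a'] then ['a','y','a'] :: bTokens (cs.drop 3)
  else if cs.take 2 = ['y','e'] then ['y','e'] :: bTokens (cs.drop 2)
  else if cs.take 3 = ['w','o','o'] then ['w','o','o'] :: bTokens (cs.drop 3)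
  else if cs.take 2 = ['m','a'] then ['m','a'] :: bTokens (cs.drop 2)
  else bTokens (cs.drop 1)
termination_by cs.length
decreasing_by all_goals (simp only [List.length_drop]; have := List.length_pos_iff.mpr h0; omega)

-- ''.join(tokens) == word → flatten; all(a != b for a, b in zip(tokens, tokens[1:])) → zip/all.
def solution_alt (babbling : List String) : Int :=
  babbling.foldl (fun answer word =>
    let ts := bTokens word.toList
    if ts.flatten = word.toList ∧ (ts.zip ts.tail).all (fun p => p.1 != p.2) = true then answer + 1
    else answer) 0

-- ===== PRECONDITION & SPEC =====
def Spec_solution (babbling : List String) (out : Int) : Prop := out = solution_alt babbling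
instance (babbling : List String) (out : Int) : Decidable (Spec_solution babbling out) := by unfold Spec_solution; infer_instance

-- ===== CLAIM (what is proved, stated in full; the proofs are below) =====
def Claim_equal_solution : Prop := ∀ (babbling : List String), Dom_solution babbling → Spec_solution babbling (solution babbling)

-- ===== LEMMAS AND PROOFS =====

theorem bne_list_comm (a b : List Char) : (a != b) = (b != a) := by
  by_cases h : a = b
  · simp [h]
  · simp [bne, h, Ne.symm h]

-- A's "check" threaded down the token list: head ≠ check, then adjacent tokens distinct.
def chainOK (check : List Char) : List (List Char) → Bool
  | [] => true
  | t :: ts => (t != check) && chainOK t ts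

theorem flatten_le (n : Nat) (cs : List Char) (h : cs.length ≤ n) :
    (bTokens cs).flatten.length ≤ cs.length := by
  induction n generalizing cs with
  | zero =>
    have hnil : cs = [] := by cases cs <;> simp_all
    subst hnil
    rw [bTokens]; simp
  | succ n ih =>
    rw [bTokens]
    split_ifs with h0 h3 hy hw hm
    · simp
    · have hl := congrArg List.length h3
      simp only [List.length_take, List.length_cons, List.length_nil] at hl
      have hrec := ih (cs.drop 3) (by simp only [List.length_drop]; omega)
      simp only [List.flatten_cons, List.length_append, List.length_cons, List.length_nil,
        List.length_drop] at hrec ⊢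
      omega
    · have hl := congrArg List.length hy
      simp only [List.length_take, List.length_cons, List.length_nil] at hl
      have hrec := ih (cs.drop 2) (by simp only [List.length_drop]; omega)
      simp only [List.flatten_cons, List.length_append, List.length_cons, List.length_nil,
        List.length_drop] at hrec ⊢
      omega
    · have hl := congrArg List.length hw
      simp only [List.length_take, List.length_cons, List.length_nil] at hl
      have hrec := ih (cs.drop 3) (by simp only [List.length_drop]; omega)
      simp only [List.flatten_cons, List.length_append, List.length_cons, List.length_nil,
        List.length_drop] at hrec ⊢
      omega
    · have hl := congrArg List.length hm
      simp only [List.length_take, List.length_cons, List.length_nil] at hl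
      have hrec := ih (cs.drop 2) (by simp only [List.length_drop]; omega)
      simp only [List.flatten_cons, List.length_append, List.length_cons, List.length_nil,
        List.length_drop] at hrec ⊢
      omega
    · have hpos : 0 < cs.length := List.length_pos_iff.mpr h0
      have hrec := ih (cs.drop 1) (by simp only [List.length_drop]; omega)
      simp only [List.length_drop] at hrec ⊢
      omega

theorem flatten_bTokens_length_le (cs : List Char) : (bTokens cs).flatten.length ≤ cs.length :=
  flatten_le cs.length cs le_rfl

theorem bTokens_mem_ne_nil {cs : List Char} {t : List Char} (h : t ∈ bTokens cs) : t ≠ [] := by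
  fun_induction bTokens cs <;> simp_all <;> rcases h with h | h <;> simp_all

theorem chainOK_eq_zip (ts : List (List Char)) (c : List Char) :
    chainOK c ts = (match ts with
      | [] => true
      | t :: _ => (t != c) && (ts.zip ts.tail).all (fun p => p.1 != p.2)) := by
  induction ts generalizing c with
  | nil => rfl
  | cons t ts ih =>
    cases ts with
    | nil => simp [chainOK]
    | cons t' r =>
      rw [show chainOK c (t :: t' :: r) = ((t != c) && chainOK t (t' :: r)) from rfl, ih t]
      simp only [List.zip_cons_cons, List.tail_cons, List.all_cons]
      rw [bne_list_comm t' t]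

theorem go_eq (n : Nat) (w : List Char) (i : Nat) (check : List Char) (hn : w.length - i ≤ n) :
    solGo w i check =
      (if (bTokens (w.drop i)).flatten = w.drop i ∧ chainOK check (bTokens (w.drop i)) = true then 1 else 0) := by
  induction n generalizing i check with
  | zero =>
    have hi : w.length ≤ i := by omega
    rw [solGo]
    simp [List.drop_eq_nil_of_le hi, bTokens, chainOK, hi]
  | succ n ih =>
    by_cases hi : i ≥ w.length
    · rw [solGo]
      simp [List.drop_eq_nil_of_le hi, bTokens, chainOK, hi]
    · have hd : w.drop i ≠ [] := by
        simp only [ne_eq, List.drop_eq_nil_iff]; omega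
      have hs3 : PySem.List.slice w (some (i : Int)) (some ((i : Int) + 3)) = (w.drop i).take 3 := by
        have := PySem.List.slice_natCast_add w i 3; simpa using this
      have hs2 : PySem.List.slice w (some (i : Int)) (some ((i : Int) + 2)) = (w.drop i).take 2 := by
        have := PySem.List.slice_natCast_add w i 2; simpa using this
      rw [solGo, hs3, hs2]
      rw [if_neg hi]
      by_cases h3 : (w.drop i).take 3 = ['a','y','a']
      · have hdec : w.drop i = ['a','y','a'] ++ (w.drop i).drop 3 := by
          conv_lhs => rw [← List.take_append_drop 3 (w.drop i)]
          rw [h3]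
        have h2 : (w.drop i).take 2 = ['a','y'] := by
          have h := congrArg (List.take 2) h3
          rw [List.take_take] at h
          simpa using h
        have hbt : bTokens (w.drop i) = ['a','y','a'] :: bTokens ((w.drop i).drop 3) := by
          rw [bTokens]; simp [hd, h3]
        have hdrop : w.drop (i + 3) = (w.drop i).drop 3 := by
          rw [List.drop_drop]
        by_cases hc : check = ['a','y','a']
        · subst hc
          simp [h3, h2, hbt, chainOK]
        · rw [if_pos ⟨h3, hc⟩, ih (i + 3) ['a','y','a'] (by omega), hdrop, hbt]
          have hcond : ((bTokens ((w.drop i).drop 3)).flatten = (w.drop i).drop 3 ∧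
                chainOK ['a','y','a'] (bTokens ((w.drop i).drop 3)) = true) ↔
              ((['a','y','a'] :: bTokens ((w.drop i).drop 3)).flatten = w.drop i ∧
                chainOK check (['a','y','a'] :: bTokens ((w.drop i).drop 3)) = true) := by
            rw [List.flatten_cons]
            conv_rhs => rw [hdec]
            simp [chainOK, bne, hc, Ne.symm hc]
          rw [if_congr hcond rfl rfl]
      · by_cases hy : (w.drop i).take 2 = ['y','e']
        · have hdec : w.drop i = ['y','e'] ++ (w.drop i).drop 2 := by
            conv_lhs => rw [← List.take_append_drop 2 (w.drop i)]
            rw [hy]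
          have hw : (w.drop i).take 3 ≠ ['w','o','o'] := by
            intro h
            have h' := congrArg (List.take 2) h
            rw [List.take_take] at h'
            simp [hy] at h'
          have hm : (w.drop i).take 2 ≠ ['m','a'] := by rw [hy]; decide
          have hbt : bTokens (w.drop i) = ['y','e'] :: bTokens ((w.drop i).drop 2) := by
            rw [bTokens]; simp [hd, h3, hy]
          have hdrop : w.drop (i + 2) = (w.drop i).drop 2 := by
            rw [List.drop_drop]
          by_cases hc : check = ['y','e']
          · subst hc
            simp [h3, hy, hw, hm, hbt, chainOK]
          · rw [if_neg (by simp [h3]), if_pos ⟨hy, hc⟩, ih (i + 2) ['y','e'] (by omega), hdrop, hbt]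
            have hcond : ((bTokens ((w.drop i).drop 2)).flatten = (w.drop i).drop 2 ∧
                  chainOK ['y','e'] (bTokens ((w.drop i).drop 2)) = true) ↔
                ((['y','e'] :: bTokens ((w.drop i).drop 2)).flatten = w.drop i ∧
                  chainOK check (['y','e'] :: bTokens ((w.drop i).drop 2)) = true) := by
              rw [List.flatten_cons]
              conv_rhs => rw [hdec]
              simp [chainOK, bne, hc, Ne.symm hc]
            rw [if_congr hcond rfl rfl]
        · by_cases hwo : (w.drop i).take 3 = ['w','o','o']
          · have hdec : w.drop i = ['w','o','o'] ++ (w.drop i).drop 3 := by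
              conv_lhs => rw [← List.take_append_drop 3 (w.drop i)]
              rw [hwo]
            have h2 : (w.drop i).take 2 = ['w','o'] := by
              have h := congrArg (List.take 2) hwo
              rw [List.take_take] at h
              simpa using h
            have hm : (w.drop i).take 2 ≠ ['m','a'] := by rw [h2]; decide
            have hbt : bTokens (w.drop i) = ['w','o','o'] :: bTokens ((w.drop i).drop 3) := by
              rw [bTokens]; simp [hd, h3, hy, hwo]
            have hdrop : w.drop (i + 3) = (w.drop i).drop 3 := by
              rw [List.drop_drop]
            by_cases hc : check = ['w','o','o']
            · subst hc
              simp [h3, hy, hwo, hm, hbt, chainOK]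
            · rw [if_neg (by simp [h3]), if_neg (by simp [hy]), if_pos ⟨hwo, hc⟩,
                ih (i + 3) ['w','o','o'] (by omega), hdrop, hbt]
              have hcond : ((bTokens ((w.drop i).drop 3)).flatten = (w.drop i).drop 3 ∧
                    chainOK ['w','o','o'] (bTokens ((w.drop i).drop 3)) = true) ↔
                  ((['w','o','o'] :: bTokens ((w.drop i).drop 3)).flatten = w.drop i ∧
                    chainOK check (['w','o','o'] :: bTokens ((w.drop i).drop 3)) = true) := by
                rw [List.flatten_cons]
                conv_rhs => rw [hdec]
                simp [chainOK, bne, hc, Ne.symm hc]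
              rw [if_congr hcond rfl rfl]
          · by_cases hma : (w.drop i).take 2 = ['m','a']
            · have hdec : w.drop i = ['m','a'] ++ (w.drop i).drop 2 := by
                conv_lhs => rw [← List.take_append_drop 2 (w.drop i)]
                rw [hma]
              have hbt : bTokens (w.drop i) = ['m','a'] :: bTokens ((w.drop i).drop 2) := by
                rw [bTokens]; simp [hd, h3, hy, hwo, hma]
              have hdrop : w.drop (i + 2) = (w.drop i).drop 2 := by
                rw [List.drop_drop]
              by_cases hc : check = ['m','a']
              · subst hc
                simp [h3, hy, hwo, hma, hbt, chainOK]
              · rw [if_neg (by simp [h3]), if_neg (by simp [hy]), if_neg (by simp [hwo]),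
                  if_pos ⟨hma, hc⟩, ih (i + 2) ['m','a'] (by omega), hdrop, hbt]
                have hcond : ((bTokens ((w.drop i).drop 2)).flatten = (w.drop i).drop 2 ∧
                      chainOK ['m','a'] (bTokens ((w.drop i).drop 2)) = true) ↔
                    ((['m','a'] :: bTokens ((w.drop i).drop 2)).flatten = w.drop i ∧
                      chainOK check (['m','a'] :: bTokens ((w.drop i).drop 2)) = true) := by
                  rw [List.flatten_cons]
                  conv_rhs => rw [hdec]
                  simp [chainOK, bne, hc, Ne.symm hc]
                rw [if_congr hcond rfl rfl]
            · have hbt : bTokens (w.drop i) = bTokens ((w.drop i).drop 1) := by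
                rw [bTokens]; simp [hd, h3, hy, hwo, hma]
              have hlen := flatten_bTokens_length_le ((w.drop i).drop 1)
              have hdpos : 0 < (w.drop i).length := List.length_pos_iff.mpr hd
              have hne : (bTokens ((w.drop i).drop 1)).flatten ≠ w.drop i := by
                intro h
                have hl := congrArg List.length h
                simp only [List.length_drop] at hlen hl hdpos
                omega
              rw [if_neg (by simp [h3]), if_neg (by simp [hy]), if_neg (by simp [hwo]),
                if_neg (by simp [hma]), hbt]
              rw [if_neg (by intro h; exact hne h.1)]

theorem per_word (w : List Char) :
    solGo w 0 [] =
      (if (bTokens w).flatten = w ∧ ((bTokens w).zip (bTokens w).tail).all (fun p => p.1 != p.2) = true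
       then 1 else 0) := by
  have h := go_eq w.length w 0 [] (by omega)
  simp only [List.drop_zero] at h
  rw [h]
  have hc : chainOK [] (bTokens w) = ((bTokens w).zip (bTokens w).tail).all (fun p => p.1 != p.2) := by
    rw [chainOK_eq_zip]
    cases hbt : bTokens w with
    | nil => simp
    | cons t ts =>
      have ht : t ≠ [] := bTokens_mem_ne_nil (by rw [hbt]; exact List.mem_cons_self ..)
      simp [bne, ht]
  simp only [hc]

theorem fold_eq (l : List String) (a : Int) :
    l.foldl (fun answer word => answer + solGo word.toList 0 []) a
      = l.foldl (fun answer word =>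
          let ts := bTokens word.toList
          if ts.flatten = word.toList ∧ (ts.zip ts.tail).all (fun p => p.1 != p.2) = true then answer + 1
          else answer) a := by
  induction l generalizing a with
  | nil => rfl
  | cons w l ih =>
    simp only [List.foldl_cons]
    rw [per_word]
    split_ifs
    · rw [ih]
    · rw [add_zero, ih]

-- ===== VERDICT (by name: the statement is the Claim_ definition above) =====
theorem solution_spec : Claim_equal_solution := by
  intro babbling _
  unfold Spec_solution solution solution_alt
  exact fold_eq babbling 0
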